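-- pv_equiv track=rewrite | github.com/shi0524/algorithmbasic2020 | Python2/class26/Code01_SumOfSubarrayMinimums.py | leftNearLessEqual3
-- ===== SOURCE A (Python) =====
-- def leftNearLessEqual3(arr):
--     n = len(arr)
--     left = [0] * n
--     stack = []
--     stackk = []
--     for i in range(n):
--         while stack and arr[stack[-1]] > arr[i]:
--             cur = stack.pop()
--             left[cur] = stack[-1] if stack else -1
--             stackk.pop()
--         stack.append(i)
--         stackk.append(arr[i])
--     while stack:
--         cur = stack.pop()
--         left[cur] = stack[-1] if stack else -1
--         stackk.pop()
--     return left
-- ===== SOURCE B (Python) =====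
-- def leftNearLessEqual3(arr):
--     res = []
--     for i in range(len(arr)):
--         j = i - 1
--         while j >= 0 and arr[j] > arr[i]:
--             j -= 1
--         res.append(j)
--     return res
-- ===== Notes on version B (the rewrite author's own statement) =====
-- stated objective: simpler
-- what changed: Replaced the monotonic index/value stack pass (with its mirrored dead stackk and final flush) by a direct backward scan per element that walks left until it finds a value <= arr[i], appending results in order.
import Mathlib
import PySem

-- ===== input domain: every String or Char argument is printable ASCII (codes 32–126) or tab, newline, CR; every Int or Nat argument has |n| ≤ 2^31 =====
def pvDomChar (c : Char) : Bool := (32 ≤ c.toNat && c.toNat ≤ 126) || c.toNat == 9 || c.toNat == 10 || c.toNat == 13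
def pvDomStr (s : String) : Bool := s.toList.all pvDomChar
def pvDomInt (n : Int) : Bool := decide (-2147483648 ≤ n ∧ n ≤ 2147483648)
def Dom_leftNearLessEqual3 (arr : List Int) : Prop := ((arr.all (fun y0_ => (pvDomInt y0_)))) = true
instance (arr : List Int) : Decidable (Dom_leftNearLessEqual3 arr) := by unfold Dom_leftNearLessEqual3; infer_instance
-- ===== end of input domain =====

-- B replaces A's monotonic-stack pass by a per-element backward scan (simpler, no stack state).

-- ===== PORT A =====
-- Every Python index used by A is in range, so `arr.getD idx 0` is exact there.
-- `stack[-1] if stack else -1`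
def pvBelowOf : List Nat → Int
  | [] => -1
  | j :: _ => (j : Int)

-- the inner `while stack and arr[stack[-1]] > arr[i]` loop; stack top at head
def pvPopLoop (arr : List Int) (x : Int) :
    List Int → List Nat → List Int → List Int × List Nat × List Int
  | left, [], kk => (left, [], kk)
  | left, c :: rest, kk =>
    if arr.getD c 0 > x then
      pvPopLoop arr x (left.set c (pvBelowOf rest)) rest kk.tail
    else (left, c :: rest, kk)

-- the final `while stack` loop
def pvFlush : List Int → List Nat → List Int → List Int
  | left, [], _ => left
  | left, c :: rest, kk => pvFlush (left.set c (pvBelowOf rest)) rest kk.tail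

def leftNearLessEqual3 (arr : List Int) : List Int :=
  let n := arr.length
  let st := (List.range n).foldl
    (fun st i =>
      let st' := pvPopLoop arr (arr.getD i 0) st.1 st.2.1 st.2.2
      (st'.1, i :: st'.2.1, arr.getD i 0 :: st'.2.2))
    (List.replicate n 0, ([] : List Nat), ([] : List Int))
  pvFlush st.1 st.2.1 st.2.2

-- ===== PORT B =====
-- `j = i - 1; while j >= 0 and arr[j] > arr[i]: j -= 1` — argument is j+1, result is j (or -1)
def pvBack (arr : List Int) (x : Int) : Nat → Int
  | 0 => -1
  | j + 1 => if arr.getD j 0 > x then pvBack arr x j else (j : Int)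

def leftNearLessEqual3_alt (arr : List Int) : List Int :=
  (List.range arr.length).foldl (fun res i => res ++ [pvBack arr (arr.getD i 0) i]) []

-- ===== PRECONDITION & SPEC =====
def Spec_leftNearLessEqual3 (arr : List Int) (out : List Int) : Prop := out = leftNearLessEqual3_alt arr
instance (arr : List Int) (out : List Int) : Decidable (Spec_leftNearLessEqual3 arr out) := by unfold Spec_leftNearLessEqual3; infer_instance

-- ===== CLAIM (what is proved, stated in full; the proofs are below) =====
def Claim_equal_leftNearLessEqual3 : Prop := ∀ (arr : List Int), Dom_leftNearLessEqual3 arr → Spec_leftNearLessEqual3 arr (leftNearLessEqual3 arr)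

-- ===== LEMMAS AND PROOFS =====

-- B unfolds to a map
theorem pvFoldlPush (f : Nat → Int) (l : List Nat) (acc : List Int) :
    l.foldl (fun r i => r ++ [f i]) acc = acc ++ l.map f := by
  induction l generalizing acc with
  | nil => simp
  | cons a l ih => simp [List.foldl_cons, ih]

theorem pvAltEqMap (arr : List Int) :
    leftNearLessEqual3_alt arr
      = (List.range arr.length).map (fun i => pvBack arr (arr.getD i 0) i) := by
  simpa [leftNearLessEqual3_alt] using
    pvFoldlPush (fun i => pvBack arr (arr.getD i 0) i) (List.range arr.length) []

-- characterisation of pvBack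
theorem pvBack_eq (arr : List Int) (x : Int) (j' : Nat) :
    ∀ c : Nat, j' < c → arr.getD j' 0 ≤ x →
      (∀ m, j' < m → m < c → arr.getD m 0 > x) → pvBack arr x c = (j' : Int) := by
  intro c
  induction c with
  | zero => omega
  | succ c ih =>
    intro h1 h2 h3
    by_cases hc : j' = c
    · subst hc
      simp only [pvBack]
      rw [if_neg (by omega)]
    · have hlt : j' < c := by omega
      have : arr.getD c 0 > x := h3 c hlt (by omega)
      simp only [pvBack]
      rw [if_pos this]
      exact ih hlt h2 (fun m hm1 hm2 => h3 m hm1 (by omega))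

theorem pvBack_none (arr : List Int) (x : Int) :
    ∀ c : Nat, (∀ m, m < c → arr.getD m 0 > x) → pvBack arr x c = -1 := by
  intro c
  induction c with
  | zero => intro _; rfl
  | succ c ih =>
    intro h
    simp only [pvBack]
    rw [if_pos (h c (by omega))]
    exact ih (fun m hm => h m (by omega))

-- the stack invariant: strictly decreasing, values non-increasing top→bottom,
-- each gap (and everything below the bottom) strictly greater than the element above it
def pvChain (arr : List Int) : List Nat → Prop
  | [] => True
  | [j] => ∀ m, m < j → arr.getD m 0 > arr.getD j 0
  | j :: j' :: rest =>
      j' < j ∧ arr.getD j' 0 ≤ arr.getD j 0 ∧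
      (∀ m, j' < m → m < j → arr.getD m 0 > arr.getD j 0) ∧ pvChain arr (j' :: rest)

theorem pvChain_lt (arr : List Int) :
    ∀ (s : List Nat) (c : Nat), pvChain arr (c :: s) → ∀ j ∈ s, j < c := by
  intro s
  induction s with
  | nil => intro c _ j hj; simp at hj
  | cons a s ih =>
    intro c hch j hj
    obtain ⟨h1, _, _, hch'⟩ := hch
    rcases List.mem_cons.mp hj with rfl | hj
    · exact h1
    · exact lt_trans (ih a hch' j hj) h1

theorem pvChain_tail (arr : List Int) (c : Nat) (s : List Nat) (h : pvChain arr (c :: s)) :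
    pvChain arr s := by
  cases s with
  | nil => trivial
  | cons a t => exact h.2.2.2

-- a chain element's nearest-left-≤ is exactly the element below it
theorem pvChain_back (arr : List Int) (c : Nat) (s : List Nat) (h : pvChain arr (c :: s)) :
    pvBack arr (arr.getD c 0) c = pvBelowOf s := by
  cases s with
  | nil => exact pvBack_none arr _ c h
  | cons j' t =>
    obtain ⟨h1, h2, h3, _⟩ := h
    exact pvBack_eq arr _ j' c h1 h2 h3

-- "m is above the top of s"
def pvAbove (s : List Nat) (m : Nat) : Prop :=
  match s with
  | [] => True
  | j :: _ => j < m

-- the inner pop loop preserves the invariant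
theorem pvPopLoop_spec (arr : List Int) (i : Nat) (hi : i ≤ arr.length) :
    ∀ (s : List Nat) (left kk : List Int),
    pvChain arr s →
    (∀ j ∈ s, j < i) →
    (∀ m, m < i → pvAbove s m → arr.getD m 0 > arr.getD i 0) →
    (∀ j, j < i → j ∉ s → left[j]? = some (pvBack arr (arr.getD j 0) j)) →
    left.length = arr.length →
    (let r := pvPopLoop arr (arr.getD i 0) left s kk
     pvChain arr r.2.1 ∧ (∀ j ∈ r.2.1, j < i) ∧
     (∀ m, m < i → pvAbove r.2.1 m → arr.getD m 0 > arr.getD i 0) ∧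
     (match r.2.1 with | [] => True | j :: _ => arr.getD j 0 ≤ arr.getD i 0) ∧
     (∀ j, j < i → j ∉ r.2.1 → r.1[j]? = some (pvBack arr (arr.getD j 0) j)) ∧
     r.1.length = arr.length) := by
  intro s
  induction s with
  | nil =>
    intro left kk hch hlt hgap hleft hlen
    simp only [pvPopLoop]
    exact ⟨trivial, by simp, hgap, trivial, hleft, hlen⟩
  | cons c rest ih =>
    intro left kk hch hlt hgap hleft hlen
    simp only [pvPopLoop]
    by_cases hpop : arr.getD c 0 > arr.getD i 0
    · rw [if_pos hpop]
      have hci : c < i := hlt c (by simp)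
      have hcn : c < arr.length := lt_of_lt_of_le hci hi
      have hrest_lt : ∀ j ∈ rest, j < c := pvChain_lt arr rest c hch
      have hch' : pvChain arr rest := pvChain_tail arr c rest hch
      have hgap' : ∀ m, m < i → pvAbove rest m → arr.getD m 0 > arr.getD i 0 := by
        intro m hm habove
        by_cases hmc : m = c
        · subst hmc; exact hpop
        · by_cases hmgt : c < m
          · exact hgap m hm hmgt
          · have hmlt : m < c := by omega
            cases rest with
            | nil => exact lt_trans hpop (hch m hmlt)
            | cons j' t =>
              obtain ⟨_, _, h3, _⟩ := hch
              exact lt_trans hpop (h3 m habove hmlt)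
      have hleft' : ∀ j, j < i → j ∉ rest →
          (left.set c (pvBelowOf rest))[j]? = some (pvBack arr (arr.getD j 0) j) := by
        intro j hj hjs
        by_cases hjc : j = c
        · subst hjc
          rw [List.getElem?_set_self (by omega), pvChain_back arr j rest hch]
        · rw [List.getElem?_set_ne (by omega)]
          exact hleft j hj (by simp [List.mem_cons, hjc, hjs])
      exact ih (left.set c (pvBelowOf rest)) kk.tail hch'
        (fun j hj => lt_trans (hrest_lt j hj) hci) hgap' hleft' (by simp [hlen])
    · rw [if_neg hpop]
      exact ⟨hch, hlt, hgap, by simpa using not_lt.mp hpop, hleft, hlen⟩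

-- the flush loop writes the correct value for every stack element
theorem pvFlush_spec (arr : List Int) :
    ∀ (s : List Nat) (left kk : List Int),
    pvChain arr s →
    (∀ j ∈ s, j < arr.length) →
    (∀ j, j < arr.length → j ∉ s → left[j]? = some (pvBack arr (arr.getD j 0) j)) →
    left.length = arr.length →
    ((∀ j, j < arr.length → (pvFlush left s kk)[j]? = some (pvBack arr (arr.getD j 0) j)) ∧
     (pvFlush left s kk).length = arr.length) := by
  intro s
  induction s with
  | nil =>
    intro left kk _ _ hleft hlen
    exact ⟨fun j hj => hleft j hj (by simp), hlen⟩
  | cons c rest ih =>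
    intro left kk hch hlt hleft hlen
    simp only [pvFlush]
    have hcn : c < arr.length := hlt c (by simp)
    have hrest_lt : ∀ j ∈ rest, j < c := pvChain_lt arr rest c hch
    apply ih (left.set c (pvBelowOf rest)) kk.tail (pvChain_tail arr c rest hch)
      (fun j hj => hlt j (by simp [hj]))
    · intro j hj hjs
      by_cases hjc : j = c
      · subst hjc
        rw [List.getElem?_set_self (by omega), pvChain_back arr j rest hch]
      · rw [List.getElem?_set_ne (by omega)]
        exact hleft j hj (by simp [List.mem_cons, hjc, hjs])
    · simp [hlen]

-- invariant of the main loop over range i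
def pvInv (arr : List Int) (i : Nat) (st : List Int × List Nat × List Int) : Prop :=
  pvChain arr st.2.1 ∧ (∀ j ∈ st.2.1, j < i) ∧
  (∀ m, m < i → pvAbove st.2.1 m → False) ∧
  (∀ j, j < i → j ∉ st.2.1 → st.1[j]? = some (pvBack arr (arr.getD j 0) j)) ∧
  st.1.length = arr.length

theorem pvMain_inv (arr : List Int) :
    ∀ i, i ≤ arr.length →
      pvInv arr i ((List.range i).foldl
        (fun st i =>
          let st' := pvPopLoop arr (arr.getD i 0) st.1 st.2.1 st.2.2
          (st'.1, i :: st'.2.1, arr.getD i 0 :: st'.2.2))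
        (List.replicate arr.length 0, ([] : List Nat), ([] : List Int))) := by
  intro i
  induction i with
  | zero =>
    intro _
    simp only [List.range_zero, List.foldl_nil]
    exact ⟨trivial, by simp, by simp [pvAbove], by omega, by simp⟩
  | succ i ih =>
    intro hi
    have hi' : i ≤ arr.length := by omega
    obtain ⟨hch, hlt, htop, hleft, hlen⟩ := ih hi'
    set st := (List.range i).foldl
        (fun st i =>
          let st' := pvPopLoop arr (arr.getD i 0) st.1 st.2.1 st.2.2
          (st'.1, i :: st'.2.1, arr.getD i 0 :: st'.2.2))
        (List.replicate arr.length 0, ([] : List Nat), ([] : List Int)) with hst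
    rw [List.range_succ, List.foldl_append, List.foldl_cons, List.foldl_nil, ← hst]
    have hgap : ∀ m, m < i → pvAbove st.2.1 m → arr.getD m 0 > arr.getD i 0 :=
      fun m hm ha => absurd (htop m hm ha) (by simp)
    obtain ⟨hch', hlt', hgap', htople, hleft', hlen'⟩ :=
      pvPopLoop_spec arr i hi' st.2.1 st.1 st.2.2 hch hlt hgap hleft hlen
    set r := pvPopLoop arr (arr.getD i 0) st.1 st.2.1 st.2.2 with hr
    show pvInv arr (i + 1) (r.1, i :: r.2.1, arr.getD i 0 :: r.2.2)
    refine ⟨?_, ?_, ?_, ?_, hlen'⟩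
    · cases hrs : r.2.1 with
      | nil =>
        rw [hrs] at hgap'
        show ∀ m, m < i → arr.getD m 0 > arr.getD i 0
        intro m hm
        exact hgap' m hm trivial
      | cons j' t =>
        rw [hrs] at hlt' hgap' htople hch'
        exact ⟨hlt' j' (by simp), htople, fun m hm1 hm2 => hgap' m hm2 hm1, hch'⟩
    · intro j hj
      rcases List.mem_cons.mp hj with rfl | hj
      · omega
      · exact lt_trans (hlt' j hj) (by omega)
    · intro m hm ha
      simp only [pvAbove] at ha
      omega
    · intro j hj hjs
      simp only [List.mem_cons, not_or] at hjs
      exact hleft' j (by omega) hjs.2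

-- glue: any state satisfying the invariant at i = length flushes to B's table
theorem pvFinal (arr : List Int) (st : List Int × List Nat × List Int)
    (h : pvInv arr arr.length st) :
    pvFlush st.1 st.2.1 st.2.2
      = (List.range arr.length).map (fun i => pvBack arr (arr.getD i 0) i) := by
  obtain ⟨hch, hlt, _, hleft, hlen⟩ := h
  obtain ⟨hgood, hlenf⟩ := pvFlush_spec arr st.2.1 st.1 st.2.2 hch hlt hleft hlen
  apply List.ext_getElem?
  intro j
  by_cases hj : j < arr.length
  · rw [hgood j hj, List.getElem?_map, List.getElem?_range hj]
    rfl
  · rw [List.getElem?_eq_none (by rw [hlenf]; omega),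
        List.getElem?_eq_none (by rw [List.length_map, List.length_range]; omega)]

-- ===== VERDICT (by name: the statement is the Claim_ definition above) =====
theorem leftNearLessEqual3_spec : Claim_equal_leftNearLessEqual3 := by
  intro arr _
  unfold Spec_leftNearLessEqual3
  rw [pvAltEqMap]
  exact pvFinal arr _ (pvMain_inv arr arr.length le_rfl)
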